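-- pv_equiv track=rewrite | github.com/jayshozie/ceng240 | sample-lab-questions/w5-sample.py | process_transacions
-- ===== SOURCE A (Python) =====
-- def process_transacions(transactions, lower_bound, upper_bound):
--     low = []
--     mid = []
--     high = []
--
--     for t in transactions:
--         if t <= lower_bound:
--             low.append(t)
--         elif t >= upper_bound:
--             high.append(t)
--         else:
--             mid.append(t)
--
--     return [low, mid, high]
-- ===== SOURCE B (Python) =====
-- def process_transacions(transactions, lower_bound, upper_bound):
--     low = [t for t in transactions if t <= lower_bound]
--     high = [t for t in transactions if t > lower_bound and t >= upper_bound]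
--     mid = [t for t in transactions if lower_bound < t < upper_bound]
--     return [low, mid, high]
-- ===== Notes on version B (the rewrite author's own statement) =====
-- stated objective: alternative
-- what changed: Replaces the single accumulator loop with three independent filter passes, one per bucket, each with a self-contained predicate encoding the original elif precedence.
import Mathlib
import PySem

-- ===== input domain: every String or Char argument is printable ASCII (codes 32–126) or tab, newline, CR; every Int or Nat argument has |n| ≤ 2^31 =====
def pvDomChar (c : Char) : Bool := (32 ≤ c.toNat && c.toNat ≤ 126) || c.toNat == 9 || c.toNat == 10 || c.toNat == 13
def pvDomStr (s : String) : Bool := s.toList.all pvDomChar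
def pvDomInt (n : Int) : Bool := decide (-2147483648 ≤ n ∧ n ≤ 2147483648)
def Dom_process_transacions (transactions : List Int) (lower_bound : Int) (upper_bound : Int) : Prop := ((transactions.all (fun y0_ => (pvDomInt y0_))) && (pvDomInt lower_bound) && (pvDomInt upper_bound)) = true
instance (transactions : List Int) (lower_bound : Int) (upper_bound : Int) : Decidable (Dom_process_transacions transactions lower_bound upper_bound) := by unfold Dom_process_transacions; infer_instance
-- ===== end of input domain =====

-- ===== PORT A =====
-- Port of A: single fold carrying the three accumulators (low, mid, high).
def process_transacions (transactions : List Int) (lower_bound : Int) (upper_bound : Int) : List (List Int) :=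
  let acc := transactions.foldl (fun (s : List Int × List Int × List Int) t =>
    if t ≤ lower_bound then (s.1 ++ [t], s.2.1, s.2.2)
    else if t ≥ upper_bound then (s.1, s.2.1, s.2.2 ++ [t])
    else (s.1, s.2.1 ++ [t], s.2.2)) ([], [], [])
  [acc.1, acc.2.1, acc.2.2]

-- ===== PORT B =====
-- Port of B: three independent filter passes, one per bucket.
def process_transacions_alt (transactions : List Int) (lower_bound : Int) (upper_bound : Int) : List (List Int) :=
  let low := transactions.filter (fun t => t ≤ lower_bound)
  let high := transactions.filter (fun t => lower_bound < t && upper_bound ≤ t)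
  let mid := transactions.filter (fun t => lower_bound < t && t < upper_bound)
  [low, mid, high]

-- ===== PRECONDITION & SPEC =====
def Spec_process_transacions (transactions : List Int) (lower_bound : Int) (upper_bound : Int) (out : List (List Int)) : Prop := out = process_transacions_alt transactions lower_bound upper_bound
instance (transactions : List Int) (lower_bound : Int) (upper_bound : Int) (out : List (List Int)) : Decidable (Spec_process_transacions transactions lower_bound upper_bound out) := by unfold Spec_process_transacions; infer_instance

-- ===== CLAIM (what is proved, stated in full; the proofs are below) =====
def Claim_equal_process_transacions : Prop := ∀ (transactions : List Int) (lower_bound : Int) (upper_bound : Int), Dom_process_transacions transactions lower_bound upper_bound → Spec_process_transacions transactions lower_bound upper_bound (process_transacions transactions lower_bound upper_bound)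

-- ===== LEMMAS AND PROOFS =====

-- ===== VERDICT (by name: the statement is the Claim_ definition above) =====
lemma pv_fold_inv (lb ub : Int) (ts : List Int) (l m h : List Int) :
    ts.foldl (fun (s : List Int × List Int × List Int) t =>
      if t ≤ lb then (s.1 ++ [t], s.2.1, s.2.2)
      else if t ≥ ub then (s.1, s.2.1, s.2.2 ++ [t])
      else (s.1, s.2.1 ++ [t], s.2.2)) (l, m, h)
    = (l ++ ts.filter (fun t => t ≤ lb),
       m ++ ts.filter (fun t => lb < t && t < ub),
       h ++ ts.filter (fun t => lb < t && ub ≤ t)) := by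
  induction ts generalizing l m h with
  | nil => simp
  | cons t ts ih =>
    simp only [List.foldl_cons, List.filter_cons]
    by_cases h1 : t ≤ lb
    · simp [h1, ih, show ¬ (lb < t) from not_lt.mpr h1]
    · by_cases h2 : ub ≤ t
      · simp [h1, h2, ih, show lb < t from not_le.mp h1, not_lt.mpr h2]
      · simp [h1, h2, ih, show lb < t from not_le.mp h1, not_le.mp h2]

theorem process_transacions_spec : Claim_equal_process_transacions := by
  intro ts lb ub _
  unfold Spec_process_transacions process_transacions process_transacions_alt
  simp [pv_fold_inv]
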